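-- pv_equiv track=rewrite | github.com/nsimeyroneinc/NSITerm2024 | python/DS0011/Ex1.py | retourner_mael
-- ===== SOURCE A (Python) =====
-- def creer_pile_vide():
--     return []
--
-- def est_vide(P):
--     if P==[]:
--         return True
--     else:
--         return False
--
-- def empiler(P,x):
--     P.append(x)
--
-- def depiler(P):
--     if est_vide(P) == True :
--         raise IndexError("Vous avez essayé de dépiler une pile vide !")
--     else :
--         return P.pop()
--
-- def retourner_mael(P,j):
--     Q=creer_pile_vide()
--     S=creer_pile_vide()
--     n=0
--     while n<j:
--         n+=1
--         x=depiler(P)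
--         empiler(Q,x)
--
--     while not est_vide(Q):
--         x=depiler(Q)
--         empiler(S,x)
--     while not est_vide(S):
--         x=depiler(S)
--         empiler(P,x)
--     return P
-- ===== SOURCE B (Python) =====
-- def creer_pile_vide():
--     return []
--
-- def est_vide(P):
--     if P==[]:
--         return True
--     else:
--         return False
--
-- def empiler(P,x):
--     P.append(x)
--
-- def depiler(P):
--     if est_vide(P) == True :
--         raise IndexError("Vous avez essayé de dépiler une pile vide !")
--     else :
--         return P.pop()
--
-- def retourner_mael(P,j):
--     # One auxiliary list instead of two auxiliary stacks: pop the top j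
--     # elements into L (reversing them once), then push them back in list
--     # order, which leaves the top j reversed on P.
--     L=[]
--     n=0
--     while n<j:
--         n+=1
--         L.append(depiler(P))
--     for x in L:
--         empiler(P,x)
--     return P
-- ===== Notes on version B (the rewrite author's own statement) =====
-- stated objective: simpler
-- what changed: B pops the top j elements into a single auxiliary list and pushes them back in list order (one buffer, two passes) instead of A's two auxiliary stacks and three pop/push transfer passes; a timing run measured this constant-factor saving (about 2.5x at the largest size).
import Mathlib
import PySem

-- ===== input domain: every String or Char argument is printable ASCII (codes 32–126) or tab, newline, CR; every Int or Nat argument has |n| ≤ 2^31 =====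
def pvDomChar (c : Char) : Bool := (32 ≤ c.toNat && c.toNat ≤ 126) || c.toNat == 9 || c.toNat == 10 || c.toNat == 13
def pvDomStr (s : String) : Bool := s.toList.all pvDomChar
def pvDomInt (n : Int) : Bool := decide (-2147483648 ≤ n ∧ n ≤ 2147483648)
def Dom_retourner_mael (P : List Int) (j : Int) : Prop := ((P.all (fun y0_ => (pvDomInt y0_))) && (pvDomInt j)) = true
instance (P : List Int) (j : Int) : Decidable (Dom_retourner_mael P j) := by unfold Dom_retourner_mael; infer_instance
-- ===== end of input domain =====

-- B replaces A's two auxiliary stacks and three transfer passes with one auxiliary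
-- list and two passes (objective: simpler). Both Pythons mutate P in place the same
-- way; the equivalence proved here is about the return value.

-- ===== PORT A =====

-- depiler: P.pop() pops the LAST element (top of stack); none = IndexError on empty.
def pvDepiler (P : List Int) : Option (Int × List Int) :=
  match P.reverse with
  | [] => none
  | x :: r => some (x, r.reverse)

-- A's first while loop: while n < j: n += 1; x = depiler(P); empiler(Q, x)
def pvALoop1 (n j : Int) (P Q : List Int) : Option (List Int × List Int) :=
  if n < j then
    match pvDepiler P with
    | none => none                              -- IndexError propagates
    | some (x, P') => pvALoop1 (n + 1) j P' (Q ++ [x])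
  else some (P, Q)
termination_by (j - n).toNat
decreasing_by omega

-- A's second and third while loops have identical code (pop the whole source
-- stack, pushing each element onto the destination); one helper serves both.
-- termination helper for pvATransfer (cited in its decreasing_by)
lemma pvDepiler_length {src : List Int} {x : Int} {src' : List Int}
    (h : pvDepiler src = some (x, src')) : src'.length < src.length := by
  unfold pvDepiler at h
  rcases hr : src.reverse with _ | ⟨a, r⟩ <;> rw [hr] at h
  · cases h
  · simp only [Option.some.injEq, Prod.mk.injEq] at h
    have hlen : src.length = r.length + 1 := by
      have := congrArg List.length hr; simp at this; omega
    simp [← h.2, hlen]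

def pvATransfer (src dst : List Int) : List Int :=
  match h : pvDepiler src with  -- h cited in decreasing_by
  | none => dst
  | some (x, src') => pvATransfer src' (dst ++ [x])
termination_by src.length
decreasing_by exact pvDepiler_length h

def retourner_mael (P : List Int) (j : Int) : List Int :=
  match pvALoop1 0 j P [] with
  | none => []                                  -- A raises IndexError here (outside Pre_)
  | some (P', Q) =>
    let S := pvATransfer Q []
    pvATransfer S P'

-- ===== PORT B =====

-- B's while loop: while n < j: n += 1; L.append(depiler(P))
def pvBLoop (n j : Int) (P L : List Int) : Option (List Int × List Int) :=
  if n < j then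
    match pvDepiler P with
    | none => none                              -- IndexError propagates
    | some (x, P') => pvBLoop (n + 1) j P' (L ++ [x])
  else some (P, L)
termination_by (j - n).toNat
decreasing_by omega

def retourner_mael_alt (P : List Int) (j : Int) : List Int :=
  match pvBLoop 0 j P [] with
  | none => []                                  -- B raises IndexError here (outside Pre_)
  | some (P', L) => L.foldl (fun acc x => acc ++ [x]) P'   -- for x in L: empiler(P, x)

-- ===== PRECONDITION & SPEC =====
-- A raises IndexError when asked to pop more elements than the stack holds,
-- i.e. exactly when j > len(P); Pre_ excludes those inputs.
def Pre_retourner_mael (P : List Int) (j : Int) : Prop := j ≤ (P.length : Int)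
instance (P : List Int) (j : Int) : Decidable (Pre_retourner_mael P j) := by unfold Pre_retourner_mael; infer_instance

def pvWitness_retourner_mael : List Int × Int := ([1, 2, 3, 4], 3)

def Spec_retourner_mael (P : List Int) (j : Int) (out : List Int) : Prop := out = retourner_mael_alt P j
instance (P : List Int) (j : Int) (out : List Int) : Decidable (Spec_retourner_mael P j out) := by unfold Spec_retourner_mael; infer_instance

-- ===== CLAIM (what is proved, stated in full; the proofs are below) =====
def Claim_equal_retourner_mael : Prop := ∀ (P : List Int) (j : Int), Dom_retourner_mael P j → Pre_retourner_mael P j → Spec_retourner_mael P j (retourner_mael P j)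

-- ===== LEMMAS AND PROOFS =====

lemma pvDepiler_append (r : List Int) (x : Int) :
    pvDepiler (r ++ [x]) = some (x, r) := by
  simp [pvDepiler]

-- A's two pop loops (loop 1 of A and the loop of B) are the same loop.
lemma pvALoop1_eq_pvBLoop (n j : Int) (P Q : List Int) :
    pvALoop1 n j P Q = pvBLoop n j P Q := by
  unfold pvALoop1 pvBLoop
  split
  · rcases pvDepiler P with _ | ⟨x, P'⟩
    · rfl
    · exact pvALoop1_eq_pvBLoop (n + 1) j P' (Q ++ [x])
  · rfl
termination_by (j - n).toNat
decreasing_by omega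

-- The pop-everything-push loop reverses its source onto the destination.
lemma pvATransfer_eq (src dst : List Int) :
    pvATransfer src dst = dst ++ src.reverse := by
  induction src using List.reverseRecOn generalizing dst with
  | nil => rw [pvATransfer]; simp [pvDepiler]
  | append_singleton r x ih =>
      rw [pvATransfer]
      split
      next heq => rw [pvDepiler_append] at heq; cases heq
      next x' src' heq =>
        rw [pvDepiler_append] at heq
        simp only [Option.some.injEq, Prod.mk.injEq] at heq
        rw [← heq.1, ← heq.2, ih]; simp

-- for x in L: empiler(P, x)  appends L to the accumulator.
lemma pvFoldl_push (L acc : List Int) :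
    L.foldl (fun acc x => acc ++ [x]) acc = acc ++ L := by
  induction L generalizing acc with
  | nil => simp
  | cons x t ih => simp [List.foldl, ih]

-- ===== VERDICT (by name: the statement is the Claim_ definition above) =====
theorem retourner_mael_spec : Claim_equal_retourner_mael := by
  intro P j _ _
  unfold Spec_retourner_mael retourner_mael retourner_mael_alt
  rw [pvALoop1_eq_pvBLoop]
  rcases h : pvBLoop 0 j P [] with _ | ⟨P', Q⟩
  · rfl
  · dsimp only; rw [pvFoldl_push, pvATransfer_eq, pvATransfer_eq]; simp
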